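-- pv_equiv track=rewrite | github.com/achandrasek6/ont-cpg-methylation-classifier | scripts/extract_coord_chunks_wgbs.py | decode_mv_tag
-- ===== SOURCE A (Python) =====
-- from typing import DefaultDict, Dict, Iterable, List, Optional, Tuple
--
-- def decode_mv_tag(mv: Iterable[int]) -> Tuple[int, List[int]]:
--     """
--     Decode Dorado mv tag.
--
--     mv tag format:
--       mv:B:c,[block_stride],[signal_block_move_list...]
--     with overflow encoding using -128/127 chaining.
--     """
--     mv_list = list(mv)
--     if len(mv_list) < 2:
--         raise ValueError("mv tag too short")
--
--     stride = int(mv_list[0])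
--     raw = mv_list[1:]
--
--     moves: List[int] = []
--     i = 0
--     while i < len(raw):
--         v = int(raw[i])
--         if v in (-128, 127):
--             acc = v
--             j = i + 1
--             while j < len(raw):
--                 nxt = int(raw[j])
--                 acc += nxt
--                 j += 1
--                 if nxt not in (-128, 127):
--                     break
--             moves.append(acc)
--             i = j
--         else:
--             moves.append(v)
--             i += 1
--
--     return stride, moves
-- ===== SOURCE B (Python) =====
-- from typing import Callable, Iterable, List, Tuple
--
--
-- def _chunks_after(pred: Callable[[int], bool], xs: List[int]) -> List[List[int]]:
--     """Split xs into chunks, cutting after every element satisfying pred;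
--     a trailing run with no such element forms a final chunk."""
--     chunks: List[List[int]] = []
--     cur: List[int] = []
--     for x in xs:
--         cur.append(x)
--         if pred(x):
--             chunks.append(cur)
--             cur = []
--     if cur:
--         chunks.append(cur)
--     return chunks
--
--
-- def decode_mv_tag(mv: Iterable[int]) -> Tuple[int, List[int]]:
--     """Decode Dorado mv tag: split the move list into overflow chunks
--     (each ending at its first non-sentinel), then sum each chunk."""
--     mv_list = list(mv)
--     if len(mv_list) < 2:
--         raise ValueError("mv tag too short")
--     stride = int(mv_list[0])
--     raw = [int(x) for x in mv_list[1:]]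
--     chunks = _chunks_after(lambda v: v not in (-128, 127), raw)
--     return stride, [sum(c) for c in chunks]
-- ===== Notes on version B (the rewrite author's own statement) =====
-- stated objective: alternative
-- what changed: Replaces A's nested index-jumping while loops with two staged passes: a generic splitter that cuts the raw list into chunks after every non-sentinel element, then a map that sums each chunk.
import Mathlib
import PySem

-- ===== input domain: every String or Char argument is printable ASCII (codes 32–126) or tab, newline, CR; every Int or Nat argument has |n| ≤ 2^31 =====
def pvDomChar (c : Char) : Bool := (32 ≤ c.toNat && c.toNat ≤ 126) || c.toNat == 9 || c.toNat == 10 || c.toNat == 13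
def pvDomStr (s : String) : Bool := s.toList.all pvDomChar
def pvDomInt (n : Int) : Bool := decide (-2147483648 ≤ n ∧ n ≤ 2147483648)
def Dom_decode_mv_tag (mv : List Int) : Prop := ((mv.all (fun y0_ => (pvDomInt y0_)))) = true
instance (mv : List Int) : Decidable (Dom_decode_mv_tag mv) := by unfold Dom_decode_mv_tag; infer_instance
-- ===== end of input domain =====

-- B replaces A's nested index-jumping loops with two staged passes (split into chunks after each
-- non-sentinel, then sum each chunk); equality of return values is proved on inputs of length ≥ 2
-- (A raises ValueError otherwise).

-- ===== PORT A =====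
-- A's outer while loop over raw (the current suffix plays the role of raw[i:]) and its inner
-- overflow-accumulating while loop; pvAChain is the inner loop, returning control to the outer
-- loop at its break / exhaustion, exactly as in the Python.
mutual
def pvAOuter (moves : List Int) (l : List Int) : List Int :=
  match l with
  | [] => moves
  | v :: rest =>
    if v = -128 ∨ v = 127 then pvAChain moves v rest
    else pvAOuter (moves ++ [v]) rest
def pvAChain (moves : List Int) (acc : Int) (l : List Int) : List Int :=
  match l with
  | [] => moves ++ [acc]
  | nxt :: rest =>
    if nxt = -128 ∨ nxt = 127 then pvAChain moves (acc + nxt) rest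
    else pvAOuter (moves ++ [acc + nxt]) rest
end

def decode_mv_tag (mv : List Int) : Int × List Int :=
  let stride := mv.headD 0        -- value at mv = [] irrelevant: Python raises there (outside Pre_)
  let raw := mv.tail
  (stride, pvAOuter [] raw)

-- ===== PORT B =====
-- Source B's _chunks_after: one fold building (chunks, cur), flushing cur after each non-sentinel
def pvChunkStep (st : List (List Int) × List Int) (v : Int) : List (List Int) × List Int :=
  let (chunks, cur) := st
  let cur' := cur ++ [v]
  if ¬(v = -128 ∨ v = 127) then (chunks ++ [cur'], [])
  else (chunks, cur')

def pvChunksAfter (xs : List Int) : List (List Int) :=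
  let st := xs.foldl pvChunkStep ([], [])
  if st.2 ≠ [] then st.1 ++ [st.2] else st.1

def decode_mv_tag_alt (mv : List Int) : Int × List Int :=
  let stride := mv.headD 0        -- value at mv = [] irrelevant: Python raises there (outside Pre_)
  let raw := mv.tail
  (stride, (pvChunksAfter raw).map (fun c => c.sum))

-- ===== PRECONDITION & SPEC =====
-- Pre_ excludes exactly the inputs with fewer than 2 elements, on which A raises ValueError.
def Pre_decode_mv_tag (mv : List Int) : Prop := 2 ≤ mv.length
instance (mv : List Int) : Decidable (Pre_decode_mv_tag mv) := by unfold Pre_decode_mv_tag; infer_instance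
def pvWitness_decode_mv_tag : List Int := [5, 1, 127, 3, 0]

def Spec_decode_mv_tag (mv : List Int) (out : Int × List Int) : Prop := out = decode_mv_tag_alt mv
instance (mv : List Int) (out : Int × List Int) : Decidable (Spec_decode_mv_tag mv out) := by unfold Spec_decode_mv_tag; infer_instance

-- ===== CLAIM (what is proved, stated in full; the proofs are below) =====
def Claim_equal_decode_mv_tag : Prop := ∀ (mv : List Int), Dom_decode_mv_tag mv → Pre_decode_mv_tag mv → Spec_decode_mv_tag mv (decode_mv_tag mv)

-- ===== LEMMAS AND PROOFS =====

-- A's two loops, stated against the accumulator: joint characterisation by one list induction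
theorem pvA_acc (l : List Int) : ∀ (moves : List Int) (acc : Int),
    pvAOuter moves l = moves ++ pvAOuter [] l
    ∧ pvAChain moves acc l = moves ++ pvAChain [] acc l := by
  induction l with
  | nil => intro moves acc; simp [pvAOuter, pvAChain]
  | cons v rest ih =>
      intro moves acc
      constructor
      · by_cases hs : v = -128 ∨ v = 127
        · simp only [pvAOuter, hs, ↓reduceIte]
          exact (ih moves v).2
        · simp only [pvAOuter, hs, ↓reduceIte]
          rw [(ih (moves ++ [v]) acc).1]
          simp only [List.nil_append]
          rw [(ih [v] acc).1]
          simp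
      · by_cases hs : v = -128 ∨ v = 127
        · simp only [pvAChain, hs, ↓reduceIte]
          exact (ih moves (acc + v)).2
        · simp only [pvAChain, hs, ↓reduceIte]
          rw [(ih (moves ++ [acc + v]) acc).1]
          simp only [List.nil_append]
          rw [(ih [acc + v] acc).1]
          simp

-- B's chunk fold, flushed and mapped through sum, computes A's two loops (acc = cur.sum)
theorem pvChunks_A (l : List Int) : ∀ (chunks : List (List Int)) (cur : List Int),
    (let st := l.foldl pvChunkStep (chunks, cur)
     (if st.2 ≠ [] then st.1 ++ [st.2] else st.1).map (fun c => c.sum))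
    = chunks.map (fun c => c.sum) ++
        (if cur = [] then pvAOuter [] l else pvAChain [] cur.sum l) := by
  induction l with
  | nil =>
      intro chunks cur
      by_cases hc : cur = [] <;> simp [hc, pvAOuter, pvAChain]
  | cons v rest ih =>
      intro chunks cur
      by_cases hs : v = -128 ∨ v = 127
      · -- sentinel: the chain continues (or starts); cur' = cur ++ [v] is kept, not flushed
        have hstep : pvChunkStep (chunks, cur) v = (chunks, cur ++ [v]) := by
          simp [pvChunkStep, hs]
        rw [List.foldl_cons, hstep, ih chunks (cur ++ [v])]
        have hne : ¬(cur ++ [v] = []) := by simp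
        rw [if_neg hne]
        by_cases hc : cur = []
        · subst hc
          rw [if_pos rfl]
          simp [pvAOuter, hs]
        · rw [if_neg hc]
          simp [pvAChain, hs, List.sum_append]
      · -- non-sentinel: flush the chunk cur ++ [v]
        have hstep : pvChunkStep (chunks, cur) v = (chunks ++ [cur ++ [v]], []) := by
          simp [pvChunkStep, hs]
        rw [List.foldl_cons, hstep, ih (chunks ++ [cur ++ [v]]) []]
        rw [if_pos rfl]
        by_cases hc : cur = []
        · subst hc
          rw [if_pos rfl]
          simp only [pvAOuter, hs, if_false, List.nil_append]
          rw [(pvA_acc rest [v] 0).1]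
          simp
        · rw [if_neg hc]
          simp only [pvAChain, hs, if_false, List.nil_append]
          rw [(pvA_acc rest [cur.sum + v] 0).1]
          simp [List.sum_append]

-- ===== VERDICT (by name: the statement is the Claim_ definition above) =====
theorem decode_mv_tag_spec : Claim_equal_decode_mv_tag := by
  intro mv _ _
  unfold Spec_decode_mv_tag decode_mv_tag decode_mv_tag_alt pvChunksAfter
  have h := pvChunks_A mv.tail ([] : List (List Int)) ([] : List Int)
  simp only [List.map_nil, List.nil_append, if_true] at h
  by_cases hz : (List.foldl pvChunkStep ([], []) mv.tail).2 = [] <;>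
    simp only [hz, ne_eq, not_true_eq_false, not_false_eq_true, if_true, if_false] at h ⊢ <;>
    simp [h]
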